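-- pv_equiv track=rewrite | github.com/fgcz/bfabricPy | bfabric_app_runner/src/bfabric_app_runner/inputs/prepare/prepare_resolved_directory.py | _should_strip_root_directory
-- ===== SOURCE A (Python) =====
-- def _should_strip_root_directory(all_files: list[str]) -> bool:
--     """Determine if we should strip the root directory based on archive structure."""
--     if not all_files:
--         return False
--
--     # Get unique root-level entries (directories and files)
--     root_entries = set()
--     for file_path in all_files:
--         if "/" in file_path:
--             root_entries.add(file_path.split("/")[0])
--         else:
--             root_entries.add(file_path)
--
--     # Only strip if there's exactly one root-level entry and it's a directory
--     if len(root_entries) == 1: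
--         root_entry = next(iter(root_entries))
--         # Check if this root entry is a directory (has files under it)
--         return any(file_path.startswith(root_entry + "/") for file_path in all_files)
--
--     return False
-- ===== SOURCE B (Python) =====
-- def _should_strip_root_directory(all_files: list[str]) -> bool:
--     """Single early-exit pass: compare every path against the first path's root."""
--     if not all_files:
--         return False
--     first = all_files[0]
--     idx = first.find("/")
--     root = first if idx < 0 else first[:idx]
--     prefix = root + "/"
--     has_child = False
--     for f in all_files:
--         if f.startswith(prefix):
--             has_child = True
--         elif f != root:
--             return False
--     return has_child
-- ===== Notes on version B (the rewrite author's own statement) =====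
-- stated objective: simpler
-- what changed: B drops A's set-of-roots construction, cardinality test and second startswith scan, doing one early-exit pass that compares each path to the first path's root and flags whether any path lies strictly under it.
import Mathlib
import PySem

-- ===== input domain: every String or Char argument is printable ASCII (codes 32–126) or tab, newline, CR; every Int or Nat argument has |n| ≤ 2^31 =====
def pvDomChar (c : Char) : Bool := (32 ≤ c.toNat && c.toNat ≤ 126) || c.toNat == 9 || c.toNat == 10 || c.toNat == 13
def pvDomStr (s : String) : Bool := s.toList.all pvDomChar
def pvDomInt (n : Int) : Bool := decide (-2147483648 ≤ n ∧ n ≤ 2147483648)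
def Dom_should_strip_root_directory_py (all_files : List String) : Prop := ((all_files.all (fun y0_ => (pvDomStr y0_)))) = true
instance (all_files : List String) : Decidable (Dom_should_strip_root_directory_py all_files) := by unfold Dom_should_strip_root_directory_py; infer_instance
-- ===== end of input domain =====

-- B replaces A's set-of-roots cardinality check (build a set, test len==1, then a second
-- startswith scan) by a single early-exit pass comparing each path to the first path's root.


-- ===== PORT A =====
-- str.split("/") always returns a non-empty list, so Python's [0] is exactly the head.
def should_strip_root_directory_py (all_files : List String) : Bool :=
  if all_files = [] then false
  else
    let root_entries : PySem.Set (List Char) :=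
      all_files.foldl (fun s f =>
        if PySem.Chars.isIn ['/'] f.toList then
          PySem.Set.add s ((PySem.Chars.splitOn f.toList ['/']).headD [])
        else
          PySem.Set.add s f.toList) PySem.Set.empty
    if PySem.Set.len root_entries = 1 then
      -- next(iter(root_entries)) = the first (here: only) element of the set
      let root_entry := root_entries.headD []
      all_files.any (fun f => PySem.Chars.startswith f.toList (root_entry ++ ['/']))
    else false

-- ===== PORT B =====
-- the for-loop of Source B, with its two early exits
def stripAltLoop (pre root : List Char) (files : List String) (hasChild : Bool) : Bool :=
  match files with
  | [] => hasChild
  | f :: rest =>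
    if PySem.Chars.startswith f.toList pre then stripAltLoop pre root rest true
    else if f.toList ≠ root then false
    else stripAltLoop pre root rest hasChild

def should_strip_root_directory_py_alt (all_files : List String) : Bool :=
  match all_files with
  | [] => false
  | first :: _ =>
    let idx := PySem.Chars.find first.toList ['/']
    let root := if idx < 0 then first.toList else PySem.Chars.slice first.toList none (some idx)
    stripAltLoop (root ++ ['/']) root all_files false

-- ===== PRECONDITION & SPEC =====
def Spec_should_strip_root_directory_py (all_files : List String) (out : Bool) : Prop := out = should_strip_root_directory_py_alt all_files
instance (all_files : List String) (out : Bool) : Decidable (Spec_should_strip_root_directory_py all_files out) := by unfold Spec_should_strip_root_directory_py; infer_instance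

-- ===== CLAIM (what is proved, stated in full; the proofs are below) =====
def Claim_equal_should_strip_root_directory_py : Prop := ∀ (all_files : List String), Dom_should_strip_root_directory_py all_files → Spec_should_strip_root_directory_py all_files (should_strip_root_directory_py all_files)

-- ===== LEMMAS AND PROOFS =====

-- the root of a path: everything before the first '/'
def pvRootOf (cs : List Char) : List Char := cs.takeWhile (fun c => c ≠ '/')

lemma singleton_infix_iff (a : Char) (l : List Char) : [a] <:+: l ↔ a ∈ l := by
  constructor
  · intro h; exact h.subset (List.mem_singleton_self a)
  · intro h
    obtain ⟨s, t, rfl⟩ := List.append_of_mem h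
    exact ⟨s, t, by simp⟩

-- the first piece produced by splitOn is the prefix before the first separator
lemma splitOn_go_head (l : List Char) : ∀ (fuel : Nat) (cur acc : _), l.length < fuel →
    ∃ rest, PySem.Chars.splitOn.go ['/'] fuel l cur acc =
      acc.reverse ++ (cur.reverse ++ pvRootOf l) :: rest := by
  induction l with
  | nil =>
    intro fuel cur acc h
    match fuel, h with
    | fuel + 1, _ => exact ⟨[], by simp [PySem.Chars.splitOn.go, pvRootOf]⟩
  | cons c t ih =>
    intro fuel cur acc h
    match fuel, h with
    | fuel + 1, h =>
      by_cases hc : c = '/'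
      · subst hc
        obtain ⟨r, hr⟩ := ih fuel [] (cur.reverse :: acc) (by simpa using h)
        refine ⟨pvRootOf t :: r, ?_⟩
        simp [PySem.Chars.splitOn.go, List.isPrefixOf, hr, pvRootOf]
      · obtain ⟨r, hr⟩ := ih fuel (c :: cur) acc (by simpa using h)
        refine ⟨r, ?_⟩
        simp [PySem.Chars.splitOn.go, List.isPrefixOf, hc, hr, pvRootOf]
        intro hh
        exact absurd hh.symm hc

lemma splitOn_head (cs : List Char) :
    ∃ rest, PySem.Chars.splitOn cs ['/'] = pvRootOf cs :: rest := by
  obtain ⟨r, hr⟩ := splitOn_go_head cs (cs.length + 1) [] [] (by omega)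
  exact ⟨r, by simpa [PySem.Chars.splitOn] using hr⟩

lemma rootOf_of_no_slash (cs : List Char) (hm : '/' ∉ cs) : pvRootOf cs = cs := by
  unfold pvRootOf
  rw [List.takeWhile_eq_self_iff.mpr]
  intro x hx
  simp only [ne_eq, decide_eq_true_eq]
  exact fun hxx => hm (hxx ▸ hx)

lemma takeWhile_prefix_slash (r t : List Char) (hr : '/' ∉ r) :
    pvRootOf (r ++ '/' :: t) = r := by
  induction r with
  | nil => simp [pvRootOf]
  | cons a as ih =>
    simp only [List.mem_cons, not_or] at hr
    have h2 : List.takeWhile (fun c => !decide (c = '/')) (as ++ '/' :: t) = as := by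
      simpa [pvRootOf] using ih hr.2
    simp [pvRootOf, List.takeWhile_cons, h2]
    exact fun hh => hr.1 hh.symm

lemma rootOf_decomp (cs : List Char) (hm : '/' ∈ cs) :
    ∃ t, cs = pvRootOf cs ++ '/' :: t := by
  induction cs with
  | nil => simp at hm
  | cons c cs ih =>
    by_cases hc : c = '/'
    · subst hc; exact ⟨cs, by simp [pvRootOf]⟩
    · have hm' : '/' ∈ cs := by
        rcases List.mem_cons.mp hm with h | h
        · exact absurd h.symm hc
        · exact h
      obtain ⟨t, ht⟩ := ih hm'
      refine ⟨t, ?_⟩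
      simp [pvRootOf, hc]
      conv_lhs => rw [ht]
      simp [pvRootOf]

-- roots with no '/': root == r  ⟺  the path is r itself or lies strictly under r/
lemma rootOf_eq_iff (cs r : List Char) (hr : '/' ∉ r) :
    pvRootOf cs = r ↔ (cs = r ∨ (r ++ ['/']) <+: cs) := by
  constructor
  · intro h
    by_cases hm : '/' ∈ cs
    · obtain ⟨t, ht⟩ := rootOf_decomp cs hm
      right
      exact ⟨t, by rw [ht, h]; simp⟩
    · left
      rw [← h]
      exact (rootOf_of_no_slash cs hm).symm
  · rintro (rfl | ⟨t, rfl⟩)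
    · exact rootOf_of_no_slash cs hr
    · have : r ++ ['/'] ++ t = r ++ '/' :: t := by simp
      rw [this]
      exact takeWhile_prefix_slash r t hr

lemma rootOf_no_slash (cs : List Char) : '/' ∉ pvRootOf cs := by
  intro h
  have := List.mem_takeWhile_imp h
  simp at this

-- characterization of Source B's loop
lemma stripAltLoop_eq (pre root : List Char) (files : List String) : ∀ (h : Bool),
    stripAltLoop pre root files h =
      ((files.all (fun f => PySem.Chars.startswith f.toList pre || f.toList == root)) &&
       (h || files.any (fun f => PySem.Chars.startswith f.toList pre))) := by
  induction files with
  | nil => intro h; simp [stripAltLoop]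
  | cons f rest ih =>
    intro h
    by_cases hs : PySem.Chars.startswith f.toList pre = true
    · simp [stripAltLoop, hs, ih]
    · by_cases he : f.toList = root
      · simp only [Bool.not_eq_true] at hs
        have hs2 : PySem.Chars.startswith root pre = false := by rw [← he]; exact hs
        simp [stripAltLoop, hs2, he, ih]
      · simp only [Bool.not_eq_true] at hs
        simp [stripAltLoop, hs, he]

-- a fold of Set.add over equal elements stays a singleton
lemma foldl_add_const (x : List Char) : ∀ (t : List (List Char)), (∀ y ∈ t, y = x) →
    t.foldl PySem.Set.add [x] = [x] := by
  intro t
  induction t with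
  | nil => intro; rfl
  | cons y ys ih =>
    intro h
    have hy : y = x := h y (by simp)
    subst hy
    have : PySem.Set.add [y] y = [y] := by simp [PySem.Set.add, PySem.Set.contains]
    simpa [this] using ih (fun z hz => h z (by simp [hz]))

lemma ofList_singleton_of_all_eq (x : List Char) (t : List (List Char))
    (h : ∀ y ∈ t, y = x) : PySem.Set.ofList (x :: t) = [x] := by
  rw [PySem.Set.ofList_eq_foldl]
  simpa [PySem.Set.add, PySem.Set.contains] using foldl_add_const x t h

lemma len_one_mem (s : PySem.Set (List Char)) (h : PySem.Set.len s = 1) :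
    ∃ z, s = [z] := by
  unfold PySem.Set.len at h
  match s with
  | [z] => exact ⟨z, rfl⟩
  | [] => simp at h
  | _ :: _ :: _ => simp at h; omega

-- B's computed root is pvRootOf of the first path
lemma alt_root_eq (first : List Char) :
    (if PySem.Chars.find first ['/'] < 0 then first
     else PySem.Chars.slice first none (some (PySem.Chars.find first ['/']))) = pvRootOf first := by
  by_cases hneg : PySem.Chars.find first ['/'] < 0
  · have h1 : PySem.Chars.find first ['/'] = -1 := by
      have := PySem.Chars.neg_one_le_find first ['/']
      omega
    have hni : ¬ ['/'] <:+: first := (PySem.Chars.find_eq_neg_one_iff first ['/']).mp h1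
    have hm : '/' ∉ first := fun hm => hni ((singleton_infix_iff _ _).mpr hm)
    rw [if_pos hneg]
    unfold pvRootOf
    rw [List.takeWhile_eq_self_iff.mpr]
    intro x hx
    simp only [ne_eq, decide_eq_true_eq]
    exact fun hxx => hm (hxx ▸ hx)
  · rw [if_neg hneg]
    set n := PySem.Chars.find first ['/'] with hn
    have hnn : 0 ≤ n := by omega
    have hle : n ≤ first.length := PySem.Chars.find_le_length first ['/']
    have hne : PySem.Chars.findFrom first ['/'] 0 ≠ -1 := by
      rw [PySem.Chars.findFrom_zero]; omega
    obtain ⟨-, hpre, hmin⟩ :=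
      PySem.Chars.findFrom_natCast_spec first ['/'] 0 (Nat.zero_le _) (by simpa using hne)
    simp only [Nat.cast_zero, PySem.Chars.findFrom_zero] at hpre hmin
    rw [PySem.Chars.slice_eq_listSlice, PySem.List.slice_to first hnn]
    -- take n = takeWhile (≠ '/'): position n holds '/', every earlier position does not
    rw [← hn] at hpre hmin
    have hat : first[n.toNat]? = some '/' := by
      obtain ⟨t, ht⟩ := hpre
      rw [← List.head?_drop, ← ht]
      simp
    have hbefore : ∀ i : Nat, i < n.toNat → first[i]? ≠ some '/' := by
      intro i hi hsome
      have hilt : i < first.length := by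
        by_contra hge
        rw [List.getElem?_eq_none (by omega)] at hsome
        simp at hsome
      have hget : first[i] = '/' := by
        rwa [List.getElem?_eq_getElem hilt, Option.some_inj] at hsome
      apply hmin i (Nat.zero_le _) hi
      refine ⟨first.drop (i + 1), ?_⟩
      rw [List.drop_eq_getElem_cons hilt, hget]
      simp
    -- generic: takeWhile = take at the first failing index
    clear hpre hmin hne hn
    generalize hk : n.toNat = k at hat hbefore
    clear hneg hnn hle hk
    induction first generalizing k with
    | nil => simp at hat
    | cons c cs ih =>
      match k with
      | 0 =>
        simp at hat
        simp [pvRootOf, hat]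
      | k + 1 =>
        have hc : c ≠ '/' := by
          have := hbefore 0 (by omega)
          simpa using this
        have := ih k (by simpa using hat) (fun i hi => by simpa using hbefore (i + 1) (by omega))
        simp [pvRootOf, hc] at this ⊢
        exact this

-- A's fold builds exactly the set of pvRootOf values
lemma fold_eq_ofList_roots (files : List String) :
    files.foldl (fun s f =>
        if PySem.Chars.isIn ['/'] f.toList then
          PySem.Set.add s ((PySem.Chars.splitOn f.toList ['/']).headD [])
        else
          PySem.Set.add s f.toList) PySem.Set.empty
      = PySem.Set.ofList (files.map (fun f => pvRootOf f.toList)) := by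
  rw [PySem.Set.ofList_eq_foldl, List.foldl_map]
  apply PySem.List.foldl_congr_mem
  intro s f _
  by_cases hin : PySem.Chars.isIn ['/'] f.toList = true
  · obtain ⟨r, hr⟩ := splitOn_head f.toList
    simp [hin, hr]
  · have hni := (PySem.Chars.isIn_eq_false_iff ['/'] f.toList).mp (by simpa using hin)
    have hm : '/' ∉ f.toList := fun hm => hni ((singleton_infix_iff _ _).mpr hm)
    have : pvRootOf f.toList = f.toList := by
      unfold pvRootOf
      rw [List.takeWhile_eq_self_iff.mpr]
      intro x hx
      simp only [ne_eq, decide_eq_true_eq]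
      exact fun hxx => hm (hxx ▸ hx)
    simp [hin, this]

-- ===== VERDICT (by name: the statement is the Claim_ definition above) =====
theorem should_strip_root_directory_py_spec : Claim_equal_should_strip_root_directory_py := by
  intro all_files _
  unfold Spec_should_strip_root_directory_py
  match all_files with
  | [] => rfl
  | f0 :: rest =>
    unfold should_strip_root_directory_py should_strip_root_directory_py_alt
    rw [if_neg (by simp)]
    simp only [fold_eq_ofList_roots, List.map_cons]
    rw [stripAltLoop_eq, alt_root_eq]
    set r := pvRootOf f0.toList with hrdef
    have hr : '/' ∉ r := rootOf_no_slash f0.toList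
    by_cases hall : ∀ f ∈ f0 :: rest, pvRootOf f.toList = r
    · have hset : PySem.Set.ofList (r :: rest.map (fun f => pvRootOf f.toList)) = [r] := by
        apply ofList_singleton_of_all_eq
        intro y hy
        obtain ⟨f, hf, rfl⟩ := List.mem_map.mp hy
        exact hall f (by simp [hf])
      rw [hrdef] at hset ⊢
      rw [hset]
      rw [if_pos (by simp [PySem.Set.len])]
      have hallb : ∀ f ∈ f0 :: rest,
          (PySem.Chars.startswith f.toList (pvRootOf f0.toList ++ ['/']) ||
            f.toList == pvRootOf f0.toList) = true := by
        intro f hf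
        have := (rootOf_eq_iff f.toList r hr).mp (hall f hf)
        rcases this with h | h
        · simp [h, hrdef]
        · simp [PySem.Chars.startswith_iff, hrdef ▸ h]
      rw [List.all_eq_true.mpr hallb]
      simp
    · push Not at hall
      obtain ⟨fb, hfb, hfbne⟩ := hall
      have hlen : ¬ PySem.Set.len
          (PySem.Set.ofList (r :: rest.map (fun f => pvRootOf f.toList))) = 1 := by
        intro hone
        obtain ⟨z, hz⟩ := len_one_mem _ hone
        have hrz : r = z := by
          have : r ∈ PySem.Set.ofList (r :: rest.map (fun f => pvRootOf f.toList)) :=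
            (PySem.Set.mem_ofList _ _).mpr (by simp)
          rw [hz] at this; simpa using this
        have : pvRootOf fb.toList ∈
            PySem.Set.ofList (r :: rest.map (fun f => pvRootOf f.toList)) := by
          apply (PySem.Set.mem_ofList _ _).mpr
          rcases List.mem_cons.mp hfb with rfl | hfb'
          · simp [hrdef]
          · exact List.mem_cons_of_mem _ (List.mem_map.mpr ⟨fb, hfb', rfl⟩)
        rw [hz] at this
        simp at this
        exact hfbne (this.trans hrz.symm)
      rw [hrdef] at hlen ⊢
      rw [if_neg hlen]
      have : (f0 :: rest).all
          (fun f => PySem.Chars.startswith f.toList (pvRootOf f0.toList ++ ['/']) ||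
            f.toList == pvRootOf f0.toList) = false := by
        rw [List.all_eq_false]
        refine ⟨fb, hfb, ?_⟩
        intro hgood
        apply hfbne
        rw [hrdef]
        apply (rootOf_eq_iff fb.toList (pvRootOf f0.toList) (hrdef ▸ hr)).mpr
        simp only [Bool.or_eq_true, beq_iff_eq, PySem.Chars.startswith_iff] at hgood
        tauto
      rw [this]
      simp
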